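-- pv_equiv track=rewrite | github.com/AKojtek/AISDI2021L | 0. Zadanie testowe/morse.py | prepare_line
-- ===== SOURCE A (Python) =====
-- def prepare_line(line):
--     line = line.rstrip().upper()
--     new_line = ''
--     prev_char = ' '
--     for c in line:
--         if (c >= 'A' and c <= 'Z') or (c == ' ' and prev_char != ' '):
--             new_line += c
--             prev_char = c
--     return new_line
-- ===== SOURCE B (Python) =====
-- def prepare_line(line):
--     s = line.rstrip().upper()
--     kept = ''.join(c for c in s if c == ' ' or 'A' <= c <= 'Z')
--     # keep a space only when the preceding kept char (virtually ' ' before index 0) is not a space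
--     return ''.join(c for p, c in zip(' ' + kept, kept) if c != ' ' or p != ' ')
-- ===== Notes on version B (the rewrite author's own statement) =====
-- stated objective: idiomatic
-- what changed: Replaced A's single stateful character loop (accumulator string + prev_char register) with three stateless passes: a comprehension filtering to letters/spaces, then a zip-with-predecessor comprehension that drops a space whenever the preceding kept char is a space (a virtual leading space removes leading spaces).
import Mathlib
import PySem

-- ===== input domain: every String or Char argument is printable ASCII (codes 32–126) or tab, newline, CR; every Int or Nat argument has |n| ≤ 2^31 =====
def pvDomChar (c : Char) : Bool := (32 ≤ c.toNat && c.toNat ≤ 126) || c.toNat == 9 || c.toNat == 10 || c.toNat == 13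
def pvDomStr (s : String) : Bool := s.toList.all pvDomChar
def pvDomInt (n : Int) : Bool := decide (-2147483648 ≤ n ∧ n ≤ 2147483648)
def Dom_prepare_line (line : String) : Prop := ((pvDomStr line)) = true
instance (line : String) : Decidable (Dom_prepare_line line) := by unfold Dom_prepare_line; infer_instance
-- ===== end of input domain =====

-- B replaces A's stateful prev_char loop by stateless passes (filter, then zip-with-predecessor); same values, same cost.

-- ===== PORT A =====
-- A's loop: new_line/prev_char state over the chars of line.rstrip().upper(); += ported as list append.
def prepare_line (line : String) : String :=
  let l := (PySem.Str.upper (PySem.Str.rstrip line)).toList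
  let st := l.foldl
    (fun (acc : List Char × Char) c =>
      if ('A' ≤ c ∧ c ≤ 'Z') ∨ (c = ' ' ∧ acc.2 ≠ ' ') then (acc.1 ++ [c], c) else acc)
    ([], ' ')
  String.ofList st.1

-- ===== PORT B =====
def prepare_line_alt (line : String) : String :=
  let s := (PySem.Str.upper (PySem.Str.rstrip line)).toList
  let kept := s.filter (fun c => decide (c = ' ' ∨ ('A' ≤ c ∧ c ≤ 'Z')))
  -- zip(' ' + kept, kept) pairs each kept char with its predecessor (virtual ' ' in front)
  String.ofList ((((' ' :: kept).zip kept).filter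
    (fun pc => decide (pc.2 ≠ ' ' ∨ pc.1 ≠ ' '))).map Prod.snd)

-- ===== PRECONDITION & SPEC =====
def Spec_prepare_line (line : String) (out : String) : Prop := out = prepare_line_alt line
instance (line : String) (out : String) : Decidable (Spec_prepare_line line out) := by unfold Spec_prepare_line; infer_instance

-- ===== CLAIM (what is proved, stated in full; the proofs are below) =====
def Claim_equal_prepare_line : Prop := ∀ (line : String), Dom_prepare_line line → Spec_prepare_line line (prepare_line line)

-- ===== LEMMAS AND PROOFS =====

-- structural version of A's loop body (no accumulator)
def pvG (l : List Char) (prev : Char) : List Char :=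
  match l with
  | [] => []
  | c :: r =>
    if ('A' ≤ c ∧ c ≤ 'Z') ∨ (c = ' ' ∧ prev ≠ ' ') then c :: pvG r c else pvG r prev

def pvKeep (c : Char) : Bool := decide (c = ' ' ∨ ('A' ≤ c ∧ c ≤ 'Z'))

lemma pvLetter_ne_space {c : Char} (h : 'A' ≤ c) : c ≠ ' ' := by
  rintro rfl; exact absurd h (by decide)

lemma pvFoldl_eq_g (l : List Char) (acc : List Char) (prev : Char) :
    (l.foldl (fun (acc : List Char × Char) c =>
      if ('A' ≤ c ∧ c ≤ 'Z') ∨ (c = ' ' ∧ acc.2 ≠ ' ') then (acc.1 ++ [c], c) else acc)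
      (acc, prev)).1 = acc ++ pvG l prev := by
  induction l generalizing acc prev with
  | nil => simp [pvG]
  | cons c r ih =>
    simp only [List.foldl_cons, pvG]
    by_cases h : ('A' ≤ c ∧ c ≤ 'Z') ∨ (c = ' ' ∧ prev ≠ ' ')
    · simp [h, ih]
    · simp [h, ih]

lemma pvG_filter (l : List Char) (prev : Char) :
    pvG l prev = pvG (l.filter pvKeep) prev := by
  induction l generalizing prev with
  | nil => rfl
  | cons c r ih =>
    by_cases hk : pvKeep c = true
    · have hk' : c = ' ' ∨ ('A' ≤ c ∧ c ≤ 'Z') := by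
        simpa [pvKeep] using hk
      rw [List.filter_cons_of_pos hk]
      rcases hk' with h | h
      · subst h
        by_cases hp : prev ≠ ' '
        · simp only [pvG]
          simp [hp, ih]
        · have hp : prev = ' ' := not_not.mp hp
          simp only [pvG]
          have hcond : ¬ (('A' ≤ ' ' ∧ ' ' ≤ 'Z') ∨ (' ' = ' ' ∧ prev ≠ ' ')) := by
            rintro (⟨h1, _⟩ | ⟨_, h2⟩)
            · exact absurd h1 (by decide)
            · exact h2 hp
          simp [ih]
      · simp only [pvG]
        have hcond : ('A' ≤ c ∧ c ≤ 'Z') ∨ (c = ' ' ∧ prev ≠ ' ') := Or.inl h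
        simp [hcond, ih]
    · have hk' : ¬ (c = ' ' ∨ ('A' ≤ c ∧ c ≤ 'Z')) := by
        simpa [pvKeep] using hk
      rw [List.filter_cons_of_neg hk]
      simp only [pvG]
      have hcond : ¬ (('A' ≤ c ∧ c ≤ 'Z') ∨ (c = ' ' ∧ prev ≠ ' ')) := by
        rintro (h | ⟨h, _⟩)
        · exact hk' (Or.inr h)
        · exact hk' (Or.inl h)
      simp [hcond, ih]

-- on a filtered list (only letters and spaces) the prev register is always the previous char,
-- so A's loop equals B's zip-with-predecessor filter
lemma pvG_zip (l : List Char) (prev : Char) (hl : ∀ c ∈ l, pvKeep c = true) :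
    pvG l prev = (((prev :: l).zip l).filter
      (fun pc => decide (pc.2 ≠ ' ' ∨ pc.1 ≠ ' '))).map Prod.snd := by
  induction l generalizing prev with
  | nil => rfl
  | cons c r ih =>
    have hc : c = ' ' ∨ ('A' ≤ c ∧ c ≤ 'Z') := by
      simpa [pvKeep] using hl c (by simp)
    have hr : ∀ x ∈ r, pvKeep x = true := fun x hx => hl x (by simp [hx])
    simp only [List.zip_cons_cons]
    rcases hc with h | h
    · subst h
      by_cases hp : prev = ' '
      · subst hp
        have hcond : ¬ (('A' ≤ ' ' ∧ ' ' ≤ 'Z') ∨ (' ' = ' ' ∧ (' ' : Char) ≠ ' ')) := by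
          rintro (⟨h1, _⟩ | ⟨_, h2⟩)
          · exact absurd h1 (by decide)
          · exact h2 rfl
        rw [pvG, if_neg hcond]
        rw [ih ' ' hr]
        simp
      · have hcond : ('A' ≤ ' ' ∧ ' ' ≤ 'Z') ∨ (' ' = ' ' ∧ prev ≠ ' ') := Or.inr ⟨rfl, hp⟩
        rw [pvG, if_pos hcond]
        rw [ih ' ' hr]
        simp [hp]
    · have hcond : ('A' ≤ c ∧ c ≤ 'Z') ∨ (c = ' ' ∧ prev ≠ ' ') := Or.inl h
      have hcs : c ≠ ' ' := pvLetter_ne_space h.1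
      rw [pvG, if_pos hcond]
      rw [ih c hr]
      simp [hcs]

-- ===== VERDICT (by name: the statement is the Claim_ definition above) =====
theorem prepare_line_spec : Claim_equal_prepare_line := by
  intro line _
  unfold Spec_prepare_line
  simp only [prepare_line, prepare_line_alt]
  refine congrArg String.ofList ?_
  rw [pvFoldl_eq_g, List.nil_append, pvG_filter]
  exact pvG_zip _ ' ' (fun c hc => (List.mem_filter.mp hc).2)
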